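-- pv_equiv track=rewrite | github.com/kgurianov-python/rslashlearnpython | math_related/pronic_perfect/pronic_only.py | is_pronic
-- ===== SOURCE A (Python) =====
-- from math import isqrt
--
-- def is_pronic(num: int) -> bool:
--     if num % 2:
--         return False
--     high = isqrt(num) + 1
--     while (val := (high - 1) * high) >= num:
--         if val == num:
--             return True
--         high -= 1
--     return False
-- ===== SOURCE B (Python) =====
-- from math import isqrt
--
-- def is_pronic(num: int) -> bool:
--     if num % 2:
--         return False
--     k = isqrt(num)
--     return k * (k + 1) == num
-- ===== Notes on version B (the rewrite author's own statement) =====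
-- stated objective: simpler
-- what changed: Replaces the downward while-loop search over candidate factors with a single closed-form check k*(k+1)==num where k=isqrt(num).
import Mathlib
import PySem

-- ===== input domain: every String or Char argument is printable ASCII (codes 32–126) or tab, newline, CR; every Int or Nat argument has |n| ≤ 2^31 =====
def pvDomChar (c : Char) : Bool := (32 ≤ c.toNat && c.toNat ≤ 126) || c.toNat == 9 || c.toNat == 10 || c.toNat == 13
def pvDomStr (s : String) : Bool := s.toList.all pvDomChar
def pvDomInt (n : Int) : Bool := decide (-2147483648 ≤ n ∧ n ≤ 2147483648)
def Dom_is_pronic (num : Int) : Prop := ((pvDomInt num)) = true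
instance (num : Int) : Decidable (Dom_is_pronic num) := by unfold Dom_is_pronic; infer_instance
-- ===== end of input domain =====

-- B replaces A's downward while-loop search by the single closed-form check k*(k+1) == num
-- with k = isqrt(num); objective: simpler. Both raise ValueError on negative even input
-- (excluded by Pre_is_pronic).

-- ===== PORT A =====
-- math.isqrt, ported by hand: exact for 0 ≤ n (Python raises ValueError for n < 0;
-- those inputs are outside Pre_is_pronic).
def pyIsqrt (n : Int) : Int := (Nat.sqrt n.toNat : Int)

-- the while-loop of A, fuel makes the recursion total (fuel is always sufficient under Pre_)
def pronicLoop (num : Int) : Int → Nat → Bool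
  | _, 0 => false
  | high, Nat.succ fuel =>
    if (high - 1) * high ≥ num then
      if (high - 1) * high = num then true
      else pronicLoop num (high - 1) fuel
    else false

def is_pronic (num : Int) : Bool :=
  if PySem.Int.mod num 2 ≠ 0 then false
  else pronicLoop num (pyIsqrt num + 1) (pyIsqrt num + 2).toNat

-- ===== PORT B =====
def is_pronic_alt (num : Int) : Bool :=
  if PySem.Int.mod num 2 ≠ 0 then false
  else
    let k := pyIsqrt num
    decide (k * (k + 1) = num)

-- ===== PRECONDITION & SPEC =====
-- Pre_ excludes exactly the negative even inputs, on which Python's isqrt raises ValueError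
-- (in both A and B); odd inputs return False before isqrt is reached.
def Pre_is_pronic (num : Int) : Prop := 0 ≤ num ∨ PySem.Int.mod num 2 ≠ 0
instance (num : Int) : Decidable (Pre_is_pronic num) := by unfold Pre_is_pronic; infer_instance
def pvWitness_is_pronic : Int := (12)

def Spec_is_pronic (num : Int) (out : Bool) : Prop := out = is_pronic_alt num
instance (num : Int) (out : Bool) : Decidable (Spec_is_pronic num out) := by unfold Spec_is_pronic; infer_instance

-- ===== CLAIM (what is proved, stated in full; the proofs are below) =====
def Claim_equal_is_pronic : Prop := ∀ (num : Int), Dom_is_pronic num → Pre_is_pronic num → Spec_is_pronic num (is_pronic num)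

-- ===== LEMMAS AND PROOFS =====

-- bounds of pyIsqrt for nonnegative input
theorem pyIsqrt_le {n : Int} (h : 0 ≤ n) : pyIsqrt n * pyIsqrt n ≤ n := by
  unfold pyIsqrt
  have hs : Nat.sqrt n.toNat * Nat.sqrt n.toNat ≤ n.toNat := by
    simpa [pow_two] using Nat.sqrt_le' n.toNat
  have hn : ((n.toNat : Int)) = n := Int.toNat_of_nonneg h
  calc (Nat.sqrt n.toNat : Int) * (Nat.sqrt n.toNat : Int)
      = ((Nat.sqrt n.toNat * Nat.sqrt n.toNat : Nat) : Int) := by push_cast; ring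
    _ ≤ (n.toNat : Int) := by exact_mod_cast hs
    _ = n := hn

theorem pyIsqrt_lt {n : Int} (h : 0 ≤ n) : n < (pyIsqrt n + 1) * (pyIsqrt n + 1) := by
  unfold pyIsqrt
  have hs : n.toNat < (Nat.sqrt n.toNat + 1) * (Nat.sqrt n.toNat + 1) := by
    simpa [pow_two, Nat.succ_eq_add_one] using Nat.lt_succ_sqrt' n.toNat
  have hn : ((n.toNat : Int)) = n := Int.toNat_of_nonneg h
  calc n = (n.toNat : Int) := hn.symm
    _ < (((Nat.sqrt n.toNat + 1) * (Nat.sqrt n.toNat + 1) : Nat) : Int) := by exact_mod_cast hs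
    _ = ((Nat.sqrt n.toNat : Int) + 1) * ((Nat.sqrt n.toNat : Int) + 1) := by push_cast; ring

theorem pyIsqrt_nonneg (n : Int) : 0 ≤ pyIsqrt n := by
  unfold pyIsqrt; exact Int.natCast_nonneg _

-- ===== VERDICT (by name: the statement is the Claim_ definition above) =====
theorem is_pronic_spec : Claim_equal_is_pronic := by
  intro num _ hpre
  unfold Spec_is_pronic is_pronic is_pronic_alt
  by_cases hm : PySem.Int.mod num 2 ≠ 0
  · rw [if_pos hm, if_pos hm]
  · -- even branch; Pre_ gives 0 ≤ num
    have hnum : 0 ≤ num := hpre.resolve_right (by simpa using hm)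
    rw [if_neg hm, if_neg hm]
    set S : Int := pyIsqrt num with hS
    have hSnn : 0 ≤ S := pyIsqrt_nonneg num
    have hle : S * S ≤ num := pyIsqrt_le hnum
    have hlt : num < (S + 1) * (S + 1) := pyIsqrt_lt hnum
    have hfuel : (S + 2).toNat = S.toNat + 2 := by omega
    have hhead : (S + 1 - 1) * (S + 1) = S * (S + 1) := by ring
    rw [hfuel]
    show pronicLoop num (S + 1) (S.toNat + 2) = decide (S * (S + 1) = num)
    unfold pronicLoop
    simp only [hhead]
    by_cases hge : S * (S + 1) ≥ num
    · by_cases heq : S * (S + 1) = num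
      · simp [heq]
      · -- second iteration: (S - 1) * S < num, loop returns false
        have hS1 : 1 ≤ S := by
          by_contra h
          have hS0 : S = 0 := by omega
          rw [hS0] at hge heq
          simp at hge heq
          omega
        have hlt2 : (S - 1) * S < num := by nlinarith
        simp only [hge, if_true, heq, if_false]
        unfold pronicLoop
        have h11 : S + 1 - 1 - 1 = S - 1 := by ring
        have h12 : S + 1 - 1 = S := by ring
        rw [h12]
        simp [not_le.mpr hlt2]
    · have heq : S * (S + 1) ≠ num := by intro h; exact hge (le_of_eq h.symm)
      simp [hge, heq]
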